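-- pv_equiv track=rewrite | github.com/yfe404/ROSALIND | minimumSkewProblem.py | minimumSkew
-- ===== SOURCE A (Python) =====
-- def skew(genome):
--     return (genome.count('C') - genome.count('G'))
--
-- def minimumSkew(genome):
--
--     genomeLen = len(genome)
--     skews = []
--     minimumSkew = 0
--     minimizeSkew = []
--     for i in range(genomeLen):
--         skews.append(skew(genome[i:genomeLen]))
--
--
--     minimumSkew = min(skews)
--     for j in range(len(skews)):
--         if skews[j] == minimumSkew:
--             minimizeSkew.append(str(j))
--
--     return minimizeSkew
-- ===== SOURCE B (Python) =====
-- def minimumSkew(genome):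
--     # One pass: running suffix skews built right-to-left, then collect minima.
--     skews = []
--     s = 0
--     for ch in reversed(genome):
--         if ch == 'C':
--             s += 1
--         elif ch == 'G':
--             s -= 1
--         skews.append(s)
--     skews.reverse()
--     if not skews:
--         return []
--     m = min(skews)
--     return [str(i) for i, v in enumerate(skews) if v == m]
-- ===== Notes on version B (the rewrite author's own statement) =====
-- stated objective: faster
-- what changed: Replaces the O(n^2) per-index suffix count with a single right-to-left pass maintaining the running skew, then collects minima via enumerate.
-- crash fix: On the empty string A raises ValueError (min of empty list); B returns []. — e.g. on minimumSkew(""): A raises ValueError, B returns []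
import Mathlib
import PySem

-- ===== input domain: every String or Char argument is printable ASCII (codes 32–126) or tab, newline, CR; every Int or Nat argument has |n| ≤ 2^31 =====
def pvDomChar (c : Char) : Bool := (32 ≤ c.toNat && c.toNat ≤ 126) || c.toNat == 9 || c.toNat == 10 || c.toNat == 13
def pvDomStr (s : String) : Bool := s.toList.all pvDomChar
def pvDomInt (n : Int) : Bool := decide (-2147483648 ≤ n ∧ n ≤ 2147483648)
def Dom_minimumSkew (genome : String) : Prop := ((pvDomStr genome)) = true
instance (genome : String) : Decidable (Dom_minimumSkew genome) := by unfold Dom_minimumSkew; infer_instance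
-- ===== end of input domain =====

-- B replaces A's O(n^2) per-suffix recount with one right-to-left running-skew pass; return value only, no mutation observable.

-- ===== PORT A =====
-- genome.count('C') - genome.count('G'); counting a single character as a substring equals List.count, exact here
def skewA (g : List Char) : Int := (g.count 'C' : Int) - (g.count 'G' : Int)

def minimumSkew (genome : String) : List String :=
  let g := genome.toList
  let genomeLen : Int := (g.length : Int)
  let skews : List Int :=
    (PySem.List.pyRange 0 genomeLen 1).foldl
      (fun acc i => acc ++ [skewA (PySem.List.slice g (some i) (some genomeLen))]) []
  match PySem.List.min? skews (fun x => x) with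
  | none => []   -- unreachable under Pre_: Python raises ValueError on min([])
  | some m =>
    (PySem.List.pyRange 0 (skews.length : Int) 1).foldl
      (fun acc j => if PySem.List.pyGetD skews j 0 = m then acc ++ [PySem.Int.toStr j] else acc) []

-- ===== PORT B =====
def minimumSkew_alt (genome : String) : List String :=
  let g := genome.toList
  let p := g.reverse.foldl
    (fun (p : Int × List Int) ch =>
      let s := if ch = 'C' then p.1 + 1 else if ch = 'G' then p.1 - 1 else p.1
      (s, p.2 ++ [s])) (0, [])
  let skews := p.2.reverse
  match PySem.List.min? skews (fun x => x) with
  | none => []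
  | some m =>
    (PySem.List.enumerate skews 0).filterMap
      (fun q => if q.2 = m then some (PySem.Int.toStr q.1) else none)

-- ===== PRECONDITION & SPEC =====
-- Pre_ excludes only the empty string, on which A raises ValueError (min() of an empty list).
def Pre_minimumSkew (genome : String) : Prop := genome.toList ≠ []
instance (genome : String) : Decidable (Pre_minimumSkew genome) := by unfold Pre_minimumSkew; infer_instance
def pvWitness_minimumSkew : String := "GATC"

-- On the empty string A raises ValueError (min of an empty list); B returns [].
def Raises_minimumSkew (genome : String) : Prop := genome.toList = []
instance (genome : String) : Decidable (Raises_minimumSkew genome) := by unfold Raises_minimumSkew; infer_instance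
def pvRaiseWitness_minimumSkew : String := ""
def pvRaiseWitnessOut_minimumSkew : List String := []

def Spec_minimumSkew (genome : String) (out : List String) : Prop := out = minimumSkew_alt genome
instance (genome : String) (out : List String) : Decidable (Spec_minimumSkew genome out) := by unfold Spec_minimumSkew; infer_instance

-- ===== CLAIM (what is proved, stated in full; the proofs are below) =====
def Claim_equal_minimumSkew : Prop := ∀ (genome : String), Dom_minimumSkew genome → Pre_minimumSkew genome → Spec_minimumSkew genome (minimumSkew genome)
def Claim_raises_minimumSkew : Prop := (∀ (genome : String), Dom_minimumSkew genome → Raises_minimumSkew genome → ¬ Pre_minimumSkew genome) ∧ (Dom_minimumSkew (pvRaiseWitness_minimumSkew) ∧ Raises_minimumSkew (pvRaiseWitness_minimumSkew) ∧ minimumSkew_alt (pvRaiseWitness_minimumSkew) = pvRaiseWitnessOut_minimumSkew)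

-- ===== LEMMAS AND PROOFS =====

-- the suffix skew both programs compute at index k
def sufSkew (g : List Char) (k : Nat) : Int := skewA (g.drop k)

theorem skews_A_eq (g : List Char) :
    (PySem.List.pyRange 0 (g.length : Int) 1).foldl
      (fun acc i => acc ++ [skewA (PySem.List.slice g (some i) (some (g.length : Int)))]) []
    = (List.range g.length).map (sufSkew g) := by
  rw [PySem.List.foldl_append_singleton_eq_map]
  simp only [PySem.List.pyRange_one, Int.sub_zero, Int.toNat_natCast, List.map_map, List.nil_append]
  refine List.map_congr_left (fun k hk => ?_)
  simp only [Function.comp, Int.zero_add]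
  rw [PySem.List.slice_natCast]
  rw [List.take_of_length_le (by simp [List.length_drop])]
  rfl

theorem skewA_cons (a : Char) (t : List Char) :
    skewA (a :: t) = (if a = 'C' then (1:Int) else if a = 'G' then -1 else 0) + skewA t := by
  simp only [skewA, List.count_cons]
  by_cases h1 : a = 'C' <;> by_cases h2 : a = 'G' <;> simp_all <;> push_cast <;> ring

theorem fold_inv (l : List Char) (s0 : Int) (acc : List Int) :
    l.foldl (fun (p : Int × List Int) ch =>
        let s := if ch = 'C' then p.1 + 1 else if ch = 'G' then p.1 - 1 else p.1
        (s, p.2 ++ [s])) (s0, acc)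
    = (s0 + skewA l, acc ++ (List.range l.length).map (fun j => s0 + skewA (l.take (j+1)))) := by
  induction l generalizing s0 acc with
  | nil => simp [skewA]
  | cons a t ih =>
    have hs1 : (if a = 'C' then s0 + 1 else if a = 'G' then s0 - 1 else s0)
        = s0 + (if a = 'C' then (1:Int) else if a = 'G' then -1 else 0) := by
      by_cases h1 : a = 'C' <;> by_cases h2 : a = 'G' <;> simp_all <;> ring
    simp only [List.foldl_cons, ih, List.length_cons, List.range_succ_eq_map, List.map_cons,
      List.map_map]
    refine Prod.ext ?_ ?_
    · simp only [skewA_cons a t, hs1]; ring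
    · rw [List.append_assoc, List.singleton_append]
      congr 1 <;>
        (try refine ⟨?_, ?_, fun j hj => ?_⟩) <;>
        (by_cases h1 : a = 'C' <;> by_cases h2 : a = 'G' <;>
          simp_all [skewA] <;> (try push_cast) <;> (try ring))
      all_goals exact ⟨trivial, fun _ _ => trivial⟩

theorem skews_B_eq (g : List Char) :
    (g.reverse.foldl
      (fun (p : Int × List Int) ch =>
        let s := if ch = 'C' then p.1 + 1 else if ch = 'G' then p.1 - 1 else p.1
        (s, p.2 ++ [s])) (0, [])).2.reverse
    = (List.range g.length).map (sufSkew g) := by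
  rw [fold_inv]
  simp only [List.nil_append, List.length_reverse]
  apply List.ext_getElem
  · simp
  · intro k h1 h2
    simp only [List.getElem_reverse, List.getElem_map, List.getElem_range, List.length_map,
      List.length_range] at *
    rw [Int.zero_add]
    have hkn : k < g.length := by simpa using h1
    rw [List.take_reverse]
    have hk : g.length - (g.length - 1 - k + 1) = k := by omega
    rw [hk]
    simp [skewA, sufSkew, List.count_reverse]

theorem enum_collect (m : Int) : ∀ (xs : List Int) (s : Nat),
    (PySem.List.enumerate xs (s : Int)).filterMap
      (fun q => if q.2 = m then some (PySem.Int.toStr q.1) else none)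
    = ((List.range xs.length).filter (fun k => decide (xs.getD k 0 = m))).map
        (fun k => PySem.Int.toStr ((s + k : Nat) : Int))
  | [], s => by simp [PySem.List.enumerate]
  | x :: t, s => by
    have hcast : ((s : Int) + 1) = ((s + 1 : Nat) : Int) := by push_cast; ring
    rw [PySem.List.enumerate_cons, List.filterMap_cons, hcast, enum_collect m t (s + 1)]
    simp only [List.length_cons, List.range_succ_eq_map, List.filter_cons, List.getD_cons_zero,
      List.filter_map, List.map_map]
    by_cases hx : x = m <;>
      simp_all [Function.comp_def, List.getD_cons_succ] <;>
      exact List.map_congr_left (fun k hk => congrArg _ (by push_cast; ring))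

theorem collect_eq (skews : List Int) (m : Int) :
    (PySem.List.pyRange 0 (skews.length : Int) 1).foldl
      (fun acc j => if PySem.List.pyGetD skews j 0 = m then acc ++ [PySem.Int.toStr j] else acc) []
    = (PySem.List.enumerate skews 0).filterMap
        (fun q => if q.2 = m then some (PySem.Int.toStr q.1) else none) := by
  rw [PySem.List.foldl_append_ite]
  have h0 : ((0 : Nat) : Int) = (0 : Int) := rfl
  rw [← h0, enum_collect m skews 0]
  simp only [List.nil_append, PySem.List.pyRange_one, Int.sub_zero, Int.toNat_natCast,
    List.filter_map, List.map_map]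
  refine congrArg₂ _ (funext fun k => ?_) (List.filter_congr fun k hk => ?_) <;> simp

-- ===== VERDICT (by name: the statement is the Claim_ definition above) =====
theorem minimumSkew_spec : Claim_equal_minimumSkew := by
  intro genome _ hpre
  unfold Spec_minimumSkew
  simp only [minimumSkew, minimumSkew_alt]
  rw [skews_A_eq, skews_B_eq]
  cases h : PySem.List.min? ((List.range genome.toList.length).map (sufSkew genome.toList)) (fun x => x) with
  | none => rfl
  | some m => exact collect_eq _ m

@[simp] theorem minimumSkew_raises : Claim_raises_minimumSkew := by
  unfold Claim_raises_minimumSkew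
  exact ⟨fun g _ hr hp => hp hr, by decide⟩
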